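-- pv_equiv track=rewrite | github.com/tsuru7/algorithm-study | AtCoder/ABC/201-300/ABC273/D.py | solve
-- ===== SOURCE A (Python) =====
-- from collections import defaultdict
-- from bisect import bisect_left, bisect_right
--
-- def solve(h,w,rs,cs,n,walls,q,queries):
--     tate = defaultdict(list)
--     yoko = defaultdict(list)
--     for r, c in walls:
--         tate[c].append(r)
--         yoko[r].append(c)
--     for _, v in tate.items():
--         v.sort()
--     for _, v in yoko.items():
--         v.sort()
--     row = rs
--     col = cs
--     ans = []
--     for d, l in queries:
--         l = int(l)
--         if d == 'R':
--             if row in yoko: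
--                 walls = yoko[row]
--                 idx = bisect_left(walls, col)
--                 if idx == len(walls):
--                     col = min(w, col+l)
--                 else:
--                     next_wall = walls[idx]
--                     col = min(next_wall-1, col+l)
--             else:
--                 col = min(w, col+l)
--         elif d == 'L':
--             if row in yoko:
--                 walls = yoko[row]
--                 idx = bisect_left(walls, col)
--                 if idx == 0:
--                     col = max(1, col-l)
--                 else:
--                     next_wall = walls[idx-1]
--                     col = max(next_wall+1, col-l)
--             else:
--                 col = max(1, col-l)
--         elif d == 'U':
--             if col in tate:
--                 walls = tate[col]
--                 idx = bisect_left(walls, row)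
--                 if idx == 0:
--                     row = max(1, row-l)
--                 else:
--                     next_wall = walls[idx-1]
--                     row = max(next_wall+1, row-l)
--             else:
--                 row = max(1, row-l)
--         else:
--             if col in tate:
--                 walls = tate[col]
--                 idx = bisect_left(walls, row)
--                 if idx == len(walls):
--                     row = min(h, row+l)
--                 else:
--                     next_wall = walls[idx]
--                     row = min(next_wall-1, row+l)
--             else:
--                 row = min(h, row+l)
--         ans.append((row, col))
--     return ans
-- ===== SOURCE B (Python) =====
-- def solve(h, w, rs, cs, n, walls, q, queries):
--     # Per query, find the nearest blocking wall on the current line directly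
--     # with min/max over a filtered scan of the wall list (no dicts, no sorting).
--     row, col = rs, cs
--     ans = []
--     for d, l in queries:
--         l = int(l)
--         if d == 'R':
--             ws = [c2 for r2, c2 in walls if r2 == row and c2 >= col]
--             col = min(min(ws) - 1, col + l) if ws else min(w, col + l)
--         elif d == 'L':
--             ws = [c2 for r2, c2 in walls if r2 == row and c2 < col]
--             col = max(max(ws) + 1, col - l) if ws else max(1, col - l)
--         elif d == 'U':
--             ws = [r2 for r2, c2 in walls if c2 == col and r2 < row]
--             row = max(max(ws) + 1, row - l) if ws else max(1, row - l)
--         else: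
--             ws = [r2 for r2, c2 in walls if c2 == col and r2 >= row]
--             row = min(min(ws) - 1, row + l) if ws else min(h, row + l)
--         ans.append((row, col))
--     return ans
-- ===== Notes on version B (the rewrite author's own statement) =====
-- stated objective: simpler
-- what changed: B drops A's precomputed per-row/per-column dicts of sorted wall lists and bisect binary searches; each query instead finds the nearest blocking wall by a direct min/max over a filtered scan of the wall list.
import Mathlib
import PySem

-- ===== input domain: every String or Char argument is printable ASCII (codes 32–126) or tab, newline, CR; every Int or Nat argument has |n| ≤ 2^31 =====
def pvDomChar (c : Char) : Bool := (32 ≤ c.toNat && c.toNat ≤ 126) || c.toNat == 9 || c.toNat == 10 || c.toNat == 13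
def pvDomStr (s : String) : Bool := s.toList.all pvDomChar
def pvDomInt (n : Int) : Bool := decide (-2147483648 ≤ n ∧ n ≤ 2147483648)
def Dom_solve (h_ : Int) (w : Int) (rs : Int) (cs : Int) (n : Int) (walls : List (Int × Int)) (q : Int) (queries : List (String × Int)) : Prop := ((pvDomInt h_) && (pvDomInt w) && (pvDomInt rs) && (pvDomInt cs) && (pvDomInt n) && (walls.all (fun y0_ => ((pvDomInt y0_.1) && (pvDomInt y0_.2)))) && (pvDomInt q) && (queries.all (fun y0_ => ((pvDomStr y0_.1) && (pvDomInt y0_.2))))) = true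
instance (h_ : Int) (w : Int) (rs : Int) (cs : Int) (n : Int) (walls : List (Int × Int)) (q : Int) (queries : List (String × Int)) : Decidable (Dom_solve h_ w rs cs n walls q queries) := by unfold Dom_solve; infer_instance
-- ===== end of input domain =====

-- B replaces A's dict-of-sorted-lists + bisect machinery by a direct min/max scan of the
-- wall list per query (objective: simpler; B is shorter and has no precomputation).

-- ===== PORT A =====
-- tate[c].append(r) loop
def pvGroupByCol (walls : List (Int × Int)) : PySem.Dict Int (List Int) :=
  walls.foldl (fun d p => d.modify p.2 [] (fun v => v ++ [p.1])) PySem.Dict.empty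
-- yoko[r].append(c) loop
def pvGroupByRow (walls : List (Int × Int)) : PySem.Dict Int (List Int) :=
  walls.foldl (fun d p => d.modify p.1 [] (fun v => v ++ [p.2])) PySem.Dict.empty
-- 'for _, v in d.items(): v.sort()'
def pvSortVals (d : PySem.Dict Int (List Int)) : PySem.Dict Int (List Int) :=
  PySem.Dict.mk (d.items.map (fun p => (p.1, PySem.List.sorted p.2 (fun v => v) false)))
-- the 'R'/'D' branch body of A (increasing move towards bound; ws = the line's sorted walls)
def pvMoveHiA (bound : Int) (has : Bool) (ws : List Int) (x l : Int) : Int :=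
  if has then
    let idx := PySem.List.bisectLeft ws x
    if idx = ws.length then min bound (x + l) else min (ws.getD idx 0 - 1) (x + l)
  else min bound (x + l)
-- the 'L'/'U' branch body of A (decreasing move towards 1)
def pvMoveLoA (has : Bool) (ws : List Int) (x l : Int) : Int :=
  if has then
    let idx := PySem.List.bisectLeft ws x
    if idx = 0 then max 1 (x - l) else max (ws.getD (idx - 1) 0 + 1) (x - l)
  else max 1 (x - l)

def pvStepA (h_ w : Int) (tate yoko : PySem.Dict Int (List Int))
    (st : Int × Int × List (Int × Int)) (dl : String × Int) : Int × Int × List (Int × Int) :=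
  let row := st.1; let col := st.2.1; let ans := st.2.2
  let d := dl.1; let l := dl.2
  if d == "R" then
    let col' := pvMoveHiA w (yoko.contains row) (yoko.getD row []) col l
    (row, col', ans ++ [(row, col')])
  else if d == "L" then
    let col' := pvMoveLoA (yoko.contains row) (yoko.getD row []) col l
    (row, col', ans ++ [(row, col')])
  else if d == "U" then
    let row' := pvMoveLoA (tate.contains col) (tate.getD col []) row l
    (row', col, ans ++ [(row', col)])
  else
    let row' := pvMoveHiA h_ (tate.contains col) (tate.getD col []) row l
    (row', col, ans ++ [(row', col)])

def solve (h_ : Int) (w : Int) (rs : Int) (cs : Int) (n : Int) (walls : List (Int × Int)) (q : Int) (queries : List (String × Int)) : List (Int × Int) :=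
  (queries.foldl (pvStepA h_ w (pvSortVals (pvGroupByCol walls)) (pvSortVals (pvGroupByRow walls))) (rs, cs, [])).2.2

-- ===== PORT B =====
-- 'min(ws) - 1 vs x + l if ws else bound clamp' (ws = the relevant walls ahead, unsorted)
def pvMoveHiB (bound : Int) (ws : List Int) (x l : Int) : Int :=
  match PySem.List.min? ws (fun v => v) with
  | some m => min (m - 1) (x + l)
  | none => min bound (x + l)
def pvMoveLoB (ws : List Int) (x l : Int) : Int :=
  match PySem.List.max? ws (fun v => v) with
  | some m => max (m + 1) (x - l)
  | none => max 1 (x - l)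

def pvStepB (h_ w : Int) (walls : List (Int × Int))
    (st : Int × Int × List (Int × Int)) (dl : String × Int) : Int × Int × List (Int × Int) :=
  let row := st.1; let col := st.2.1; let ans := st.2.2
  let d := dl.1; let l := dl.2
  if d == "R" then
    let ws := (walls.filter (fun p => p.1 == row && decide (col ≤ p.2))).map (fun p => p.2)
    let col' := pvMoveHiB w ws col l
    (row, col', ans ++ [(row, col')])
  else if d == "L" then
    let ws := (walls.filter (fun p => p.1 == row && decide (p.2 < col))).map (fun p => p.2)
    let col' := pvMoveLoB ws col l
    (row, col', ans ++ [(row, col')])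
  else if d == "U" then
    let ws := (walls.filter (fun p => p.2 == col && decide (p.1 < row))).map (fun p => p.1)
    let row' := pvMoveLoB ws row l
    (row', col, ans ++ [(row', col)])
  else
    let ws := (walls.filter (fun p => p.2 == col && decide (row ≤ p.1))).map (fun p => p.1)
    let row' := pvMoveHiB h_ ws row l
    (row', col, ans ++ [(row', col)])

def solve_alt (h_ : Int) (w : Int) (rs : Int) (cs : Int) (n : Int) (walls : List (Int × Int)) (q : Int) (queries : List (String × Int)) : List (Int × Int) :=
  (queries.foldl (pvStepB h_ w walls) (rs, cs, [])).2.2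

-- ===== PRECONDITION & SPEC =====
def Spec_solve (h_ : Int) (w : Int) (rs : Int) (cs : Int) (n : Int) (walls : List (Int × Int)) (q : Int) (queries : List (String × Int)) (out : List (Int × Int)) : Prop := out = solve_alt h_ w rs cs n walls q queries
instance (h_ : Int) (w : Int) (rs : Int) (cs : Int) (n : Int) (walls : List (Int × Int)) (q : Int) (queries : List (String × Int)) (out : List (Int × Int)) : Decidable (Spec_solve h_ w rs cs n walls q queries out) := by unfold Spec_solve; infer_instance

-- ===== CLAIM (what is proved, stated in full; the proofs are below) =====
def Claim_equal_solve : Prop := ∀ (h_ : Int) (w : Int) (rs : Int) (cs : Int) (n : Int) (walls : List (Int × Int)) (q : Int) (queries : List (String × Int)), Dom_solve h_ w rs cs n walls q queries → Spec_solve h_ w rs cs n walls q queries (solve h_ w rs cs n walls q queries)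

-- ===== LEMMAS AND PROOFS =====

-- a minimum value characterises min? (key = id, Int)
theorem pv_min?_id_eq_some (l : List Int) (m : Int) (hm : m ∈ l)
    (hle : ∀ y ∈ l, m ≤ y) : PySem.List.min? l (fun v => v) = some m := by
  cases h : PySem.List.min? l (fun v => v) with
  | none =>
    have := (PySem.List.min?_eq_none_iff l (fun v => v)).mp h
    subst this; simp at hm
  | some m0 =>
    have h1 := PySem.List.min?_mem h
    have h2 := PySem.List.min?_isMin h
    have : m0 = m := le_antisymm (h2 m hm) (hle m0 h1)
    rw [this]

theorem pv_max?_id_eq_some (l : List Int) (m : Int) (hm : m ∈ l)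
    (hle : ∀ y ∈ l, y ≤ m) : PySem.List.max? l (fun v => v) = some m := by
  cases h : PySem.List.max? l (fun v => v) with
  | none =>
    have := (PySem.List.max?_eq_none_iff l (fun v => v)).mp h
    subst this; simp at hm
  | some m0 =>
    have h1 := PySem.List.max?_mem h
    have h2 := PySem.List.max?_isMax h
    have : m0 = m := le_antisymm (hle m0 h1) (h2 m hm)
    rw [this]

-- get?/contains/getD through pvSortVals
theorem pv_get?_sortVals (d : PySem.Dict Int (List Int)) (k : Int) :
    (pvSortVals d).get? k = (d.get? k).map (fun v => PySem.List.sorted v (fun x => x) false) := by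
  obtain ⟨items⟩ := d
  induction items with
  | nil => rfl
  | cons p rest ih =>
    simp only [pvSortVals] at ih ⊢
    rw [List.map_cons, PySem.Dict.get?_mk_cons, PySem.Dict.get?_mk_cons]
    by_cases h : (p.1 == k) = true
    · simp [h]
    · simp only [h, if_neg, Bool.false_eq_true, not_false_iff]
      exact ih

theorem pv_contains_sortVals (d : PySem.Dict Int (List Int)) (k : Int) :
    (pvSortVals d).contains k = d.contains k := by
  rw [PySem.Dict.contains_eq_isSome_get?, PySem.Dict.contains_eq_isSome_get?, pv_get?_sortVals]
  cases d.get? k <;> rfl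

theorem pv_getD_sortVals (d : PySem.Dict Int (List Int)) (k : Int) :
    (pvSortVals d).getD k [] = PySem.List.sorted (d.getD k []) (fun x => x) false := by
  rw [PySem.Dict.getD_eq_get?_getD, PySem.Dict.getD_eq_get?_getD, pv_get?_sortVals]
  cases d.get? k <;> rfl

theorem pv_getD_of_contains_false (d : PySem.Dict Int (List Int)) (k : Int)
    (h : d.contains k = false) : d.getD k [] = [] := by
  rw [PySem.Dict.getD_eq_get?_getD]
  rw [PySem.Dict.contains_eq_isSome_get?] at h
  cases hg : d.get? k <;> simp [hg] at h ⊢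

-- content of A's grouped dicts
theorem pv_getD_groupByRow (walls : List (Int × Int)) (k : Int) :
    (pvGroupByRow walls).getD k [] = (walls.filter (fun p => p.1 == k)).map (fun p => p.2) := by
  unfold pvGroupByRow
  rw [PySem.Dict.getD_foldl_modify_append]
  simp [PySem.Dict.getD_empty]

theorem pv_getD_groupByCol (walls : List (Int × Int)) (k : Int) :
    (pvGroupByCol walls).getD k [] = (walls.filter (fun p => p.2 == k)).map (fun p => p.1) := by
  unfold pvGroupByCol
  have : walls.foldl (fun d p => d.modify p.2 [] (fun v => v ++ [p.1])) PySem.Dict.empty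
      = (walls.map (fun p => (p.2, p.1))).foldl (fun d p => d.modify p.1 [] (fun v => v ++ [p.2])) PySem.Dict.empty := by
    rw [List.foldl_map]
  rw [this, PySem.Dict.getD_foldl_modify_append]
  simp [PySem.Dict.getD_empty, List.filter_map, Function.comp_def]

-- core: A's bisect step on the sorted line equals B's min over the filtered line
theorem pv_moveHi_core (bound x l : Int) (g : List Int) :
    pvMoveHiA bound true (PySem.List.sorted g (fun v => v) false) x l
      = pvMoveHiB bound (g.filter (fun v => decide (x ≤ v))) x l := by
  set s := PySem.List.sorted g (fun v => v) false with hs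
  obtain ⟨hle, hlt, hge⟩ := PySem.List.bisectLeft_spec s x
    (by simpa using PySem.List.sorted_pairwise g (fun v => v))
  by_cases hidx : PySem.List.bisectLeft s x = s.length
  · have hnil : g.filter (fun v => decide (x ≤ v)) = [] := by
      rw [List.filter_eq_nil_iff]
      intro v hv hxv
      have hvs : v ∈ s := (PySem.List.mem_sorted g (fun v => v) false v).mpr hv
      obtain ⟨j, hj, rfl⟩ := List.mem_iff_getElem.mp hvs
      have := hlt j hj (by omega)
      simp at hxv; omega
    have hmn := (PySem.List.min?_eq_none_iff ([] : List Int) (fun v => v)).mpr rfl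
    simp [pvMoveHiA, pvMoveHiB, hidx, hnil, hmn]
  · have hlen : PySem.List.bisectLeft s x < s.length := lt_of_le_of_ne hle hidx
    have hmin : PySem.List.min? (g.filter (fun v => decide (x ≤ v))) (fun v => v)
        = some s[PySem.List.bisectLeft s x] := by
      apply pv_min?_id_eq_some
      · rw [List.mem_filter]
        refine ⟨(PySem.List.mem_sorted g (fun v => v) false _).mp (List.getElem_mem hlen), ?_⟩
        simpa using hge _ hlen le_rfl
      · intro y hy
        rw [List.mem_filter] at hy
        obtain ⟨hyg, hxy⟩ := hy
        have hys : y ∈ s := (PySem.List.mem_sorted g (fun v => v) false y).mpr hyg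
        obtain ⟨j, hj, rfl⟩ := List.mem_iff_getElem.mp hys
        by_cases hji : j < PySem.List.bisectLeft s x
        · have := hlt j hj hji; simp at hxy; omega
        · exact PySem.List.sorted_id_getElem_mono g (by omega) hj
    simp [pvMoveHiA, pvMoveHiB, hidx, hmin, List.getElem?_eq_getElem hlen]

theorem pv_moveLo_core (x l : Int) (g : List Int) :
    pvMoveLoA true (PySem.List.sorted g (fun v => v) false) x l
      = pvMoveLoB (g.filter (fun v => decide (v < x))) x l := by
  set s := PySem.List.sorted g (fun v => v) false with hs
  obtain ⟨hle, hlt, hge⟩ := PySem.List.bisectLeft_spec s x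
    (by simpa using PySem.List.sorted_pairwise g (fun v => v))
  by_cases hidx : PySem.List.bisectLeft s x = 0
  · have hnil : g.filter (fun v => decide (v < x)) = [] := by
      rw [List.filter_eq_nil_iff]
      intro v hv hvx
      have hvs : v ∈ s := (PySem.List.mem_sorted g (fun v => v) false v).mpr hv
      obtain ⟨j, hj, rfl⟩ := List.mem_iff_getElem.mp hvs
      have := hge j hj (by omega)
      simp at hvx; omega
    have hmn := (PySem.List.max?_eq_none_iff ([] : List Int) (fun v => v)).mpr rfl
    simp [pvMoveLoA, pvMoveLoB, hidx, hnil, hmn]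
  · have hpos : 0 < PySem.List.bisectLeft s x := Nat.pos_of_ne_zero hidx
    have hlen : PySem.List.bisectLeft s x - 1 < s.length := by omega
    have hmax : PySem.List.max? (g.filter (fun v => decide (v < x))) (fun v => v)
        = some s[PySem.List.bisectLeft s x - 1] := by
      apply pv_max?_id_eq_some
      · rw [List.mem_filter]
        refine ⟨(PySem.List.mem_sorted g (fun v => v) false _).mp (List.getElem_mem hlen), ?_⟩
        simpa using hlt _ hlen (by omega)
      · intro y hy
        rw [List.mem_filter] at hy
        obtain ⟨hyg, hyx⟩ := hy
        have hys : y ∈ s := (PySem.List.mem_sorted g (fun v => v) false y).mpr hyg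
        obtain ⟨j, hj, rfl⟩ := List.mem_iff_getElem.mp hys
        by_cases hji : PySem.List.bisectLeft s x ≤ j
        · have := hge j hj hji; simp at hyx; omega
        · exact PySem.List.sorted_id_getElem_mono g (by omega) hlen
    simp [pvMoveLoA, pvMoveLoB, hidx, hmax, List.getElem?_eq_getElem hlen]

theorem pv_moveHi_eq (bound x l : Int) (d : PySem.Dict Int (List Int)) (k : Int) :
    pvMoveHiA bound ((pvSortVals d).contains k) ((pvSortVals d).getD k []) x l
      = pvMoveHiB bound ((d.getD k []).filter (fun v => decide (x ≤ v))) x l := by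
  rw [pv_contains_sortVals, pv_getD_sortVals]
  cases hc : d.contains k with
  | true => exact pv_moveHi_core bound x l (d.getD k [])
  | false =>
    rw [pv_getD_of_contains_false d k hc]
    rfl

theorem pv_moveLo_eq (x l : Int) (d : PySem.Dict Int (List Int)) (k : Int) :
    pvMoveLoA ((pvSortVals d).contains k) ((pvSortVals d).getD k []) x l
      = pvMoveLoB ((d.getD k []).filter (fun v => decide (v < x))) x l := by
  rw [pv_contains_sortVals, pv_getD_sortVals]
  cases hc : d.contains k with
  | true => exact pv_moveLo_core x l (d.getD k [])
  | false =>
    rw [pv_getD_of_contains_false d k hc]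
    rfl

-- the filtered line of B equals A's group filtered
theorem pv_filter_row_hi (walls : List (Int × Int)) (row x : Int) :
    ((walls.filter (fun p => p.1 == row)).map (fun p => p.2)).filter (fun v => decide (x ≤ v))
      = (walls.filter (fun p => p.1 == row && decide (x ≤ p.2))).map (fun p => p.2) := by
  rw [List.filter_map, List.filter_filter]
  refine congrArg _ (List.filter_congr ?_)
  intro a _
  simp [Function.comp, Bool.and_comm]

theorem pv_filter_row_lo (walls : List (Int × Int)) (row x : Int) :
    ((walls.filter (fun p => p.1 == row)).map (fun p => p.2)).filter (fun v => decide (v < x))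
      = (walls.filter (fun p => p.1 == row && decide (p.2 < x))).map (fun p => p.2) := by
  rw [List.filter_map, List.filter_filter]
  refine congrArg _ (List.filter_congr ?_)
  intro a _
  simp [Function.comp, Bool.and_comm]

theorem pv_filter_col_hi (walls : List (Int × Int)) (col x : Int) :
    ((walls.filter (fun p => p.2 == col)).map (fun p => p.1)).filter (fun v => decide (x ≤ v))
      = (walls.filter (fun p => p.2 == col && decide (x ≤ p.1))).map (fun p => p.1) := by
  rw [List.filter_map, List.filter_filter]
  refine congrArg _ (List.filter_congr ?_)
  intro a _
  simp [Function.comp, Bool.and_comm]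

theorem pv_filter_col_lo (walls : List (Int × Int)) (col x : Int) :
    ((walls.filter (fun p => p.2 == col)).map (fun p => p.1)).filter (fun v => decide (v < x))
      = (walls.filter (fun p => p.2 == col && decide (p.1 < x))).map (fun p => p.1) := by
  rw [List.filter_map, List.filter_filter]
  refine congrArg _ (List.filter_congr ?_)
  intro a _
  simp [Function.comp, Bool.and_comm]

theorem pv_step_eq (h_ w : Int) (walls : List (Int × Int))
    (st : Int × Int × List (Int × Int)) (dl : String × Int) :
    pvStepA h_ w (pvSortVals (pvGroupByCol walls)) (pvSortVals (pvGroupByRow walls)) st dl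
      = pvStepB h_ w walls st dl := by
  unfold pvStepA pvStepB
  by_cases hR : (dl.1 == "R") = true
  · simp only [hR, if_pos]
    rw [pv_moveHi_eq, pv_getD_groupByRow, pv_filter_row_hi]
  · by_cases hL : (dl.1 == "L") = true
    · simp only [hR, hL, if_neg, if_pos, Bool.false_eq_true, not_false_iff]
      rw [pv_moveLo_eq, pv_getD_groupByRow, pv_filter_row_lo]
    · by_cases hU : (dl.1 == "U") = true
      · simp only [hR, hL, hU, if_neg, if_pos, Bool.false_eq_true, not_false_iff]
        rw [pv_moveLo_eq, pv_getD_groupByCol, pv_filter_col_lo]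
      · simp only [hR, hL, hU, if_neg, Bool.false_eq_true, not_false_iff]
        rw [pv_moveHi_eq, pv_getD_groupByCol, pv_filter_col_hi]

-- ===== VERDICT (by name: the statement is the Claim_ definition above) =====
theorem solve_spec : Claim_equal_solve := by
  intro h_ w rs cs n walls q queries _
  unfold Spec_solve solve solve_alt
  have hstep : pvStepA h_ w (pvSortVals (pvGroupByCol walls)) (pvSortVals (pvGroupByRow walls))
      = pvStepB h_ w walls := by
    funext st dl; exact pv_step_eq h_ w walls st dl
  rw [hstep]
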